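-- pv_equiv track=rewrite | github.com/SometimesThinks/problem-solving | 백준/Silver/9656. 돌 게임 2/돌 게임 2.py | count_grundy
-- ===== SOURCE A (Python) =====
-- def count_grundy(num):
--     grundy_numbers = [0 for _ in range(num + 1)]
--     for i in range(1, num + 1):
--         next = set()
--         for act in actions:
--             if i >= act:
--                 next.add(grundy_numbers[i - act])
--         mex = 0
--         while mex in next:
--             mex += 1
--         grundy_numbers[i] = mex
--     return grundy_numbers
--
-- actions = [1, 3]
-- ===== SOURCE B (Python) =====
-- def count_grundy(num):
--     # For moves {1,3}, the Grundy number of i is simply i % 2.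
--     return [i % 2 for i in range(num + 1)]
-- ===== Notes on version B (the rewrite author's own statement) =====
-- stated objective: simpler
-- what changed: Replaces the DP table with set-building and a mex while-loop by the closed form grundy(i) = i % 2, returned as one comprehension.
import Mathlib
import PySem

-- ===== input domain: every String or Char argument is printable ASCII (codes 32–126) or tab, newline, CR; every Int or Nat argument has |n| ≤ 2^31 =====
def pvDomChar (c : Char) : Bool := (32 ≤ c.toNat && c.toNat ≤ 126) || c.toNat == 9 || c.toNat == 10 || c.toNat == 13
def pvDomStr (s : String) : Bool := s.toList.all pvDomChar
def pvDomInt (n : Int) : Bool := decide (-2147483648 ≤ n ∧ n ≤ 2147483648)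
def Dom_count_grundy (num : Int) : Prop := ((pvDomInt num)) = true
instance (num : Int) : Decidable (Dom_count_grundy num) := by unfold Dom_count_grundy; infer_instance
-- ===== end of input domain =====

-- B replaces A's DP-with-mex by the closed form grundy(i) = i % 2 (simpler; return value only).

-- ===== PORT A =====
def actions : List Int := [1, 3]

-- Python's `while mex in next: mex += 1`; fuel = |next| + 1 always suffices
-- (mex increases strictly, so it escapes a finite set within |next|+1 steps).
def mexLoop (next : PySem.Set Int) (mex : Int) : Nat → Int
  | 0 => mex
  | Nat.succ f => if PySem.Set.contains next mex then mexLoop next (mex + 1) f else mex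

def count_grundy (num : Int) : List Int :=
  let grundy0 : List Int := (PySem.List.pyRange 0 (num + 1) 1).map (fun _ => 0)
  (PySem.List.pyRange 1 (num + 1) 1).foldl
    (fun g i =>
      let next : PySem.Set Int :=
        actions.foldl
          (fun s act => if act ≤ i then PySem.Set.add s (PySem.List.pyGetD g (i - act) 0) else s)
          PySem.Set.empty
      let mex := mexLoop next 0 (next.length + 1)
      PySem.List.pySetD g i mex)
    grundy0

-- ===== PORT B =====
def count_grundy_alt (num : Int) : List Int :=
  (PySem.List.pyRange 0 (num + 1) 1).map (fun i => PySem.Int.mod i 2)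

-- ===== PRECONDITION & SPEC =====
def Spec_count_grundy (num : Int) (out : List Int) : Prop := out = count_grundy_alt num
instance (num : Int) (out : List Int) : Decidable (Spec_count_grundy num out) := by unfold Spec_count_grundy; infer_instance

-- ===== CLAIM (what is proved, stated in full; the proofs are below) =====
def Claim_equal_count_grundy : Prop := ∀ (num : Int), Dom_count_grundy num → Spec_count_grundy num (count_grundy num)

-- ===== LEMMAS AND PROOFS =====

-- the loop body of A, named for the proofs
def aStep (g : List Int) (i : Int) : List Int :=
  let next : PySem.Set Int :=
    actions.foldl
      (fun s act => if act ≤ i then PySem.Set.add s (PySem.List.pyGetD g (i - act) 0) else s)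
      PySem.Set.empty
  let mex := mexLoop next 0 (next.length + 1)
  PySem.List.pySetD g i mex

theorem count_grundy_eq_foldl (num : Int) :
    count_grundy num =
      (PySem.List.pyRange 1 (num + 1) 1).foldl aStep
        ((PySem.List.pyRange 0 (num + 1) 1).map (fun _ => 0)) := rfl

-- xs[j] for j inside the left part of an append
theorem getA (A B : List Int) (j : Nat) (hj : j < A.length) :
    PySem.List.pyGetD (A ++ B) (j : Int) 0 = A[j] := by
  rw [PySem.List.pyGetD_natCast, List.getD_eq_getElem?_getD, List.getElem?_append_left hj,
      List.getElem?_eq_getElem hj]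
  rfl

-- reading index j of a mapped range prefix of the table
theorem getCombo (f : Int → Int) (b : Int) (B : List Int) (j : Nat) (hj : (j : Int) < b) :
    PySem.List.pyGetD ((PySem.List.pyRange 0 b 1).map f ++ B) (j : Int) 0 = f (j : Int) := by
  rw [getA _ _ j (by simp [PySem.List.length_pyRange_one]; omega)]
  simp [PySem.List.getElem_pyRange_one]

-- writing at the index just past the prefix
theorem setAt (A B : List Int) (x y : Int) (m : Nat) (hm : m = A.length) :
    (A ++ x :: B).set m y = A ++ y :: B := by
  subst hm; simp

-- invariant: after processing i = 1..k, the table is [0%2,…,k%2] followed by untouched zeros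
theorem inv (n k : Nat) (hk : k ≤ n) :
    (PySem.List.pyRange 1 ((k : Int) + 1) 1).foldl aStep
        ((PySem.List.pyRange 0 ((n : Int) + 1) 1).map (fun _ => 0)) =
      (PySem.List.pyRange 0 ((k : Int) + 1) 1).map (fun i => PySem.Int.mod i 2) ++
      (PySem.List.pyRange ((k : Int) + 1) ((n : Int) + 1) 1).map (fun _ => 0) := by
  have h01 : PySem.List.pyRange 0 1 1 = [(0 : Int)] := by
    rw [show (1 : Int) = 0 + 1 by norm_num]
    exact PySem.List.pyRange_one_singleton 0
  induction k with
  | zero =>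
    rw [show ((0 : Nat) : Int) + 1 = 1 by norm_num,
        PySem.List.pyRange_one_eq_nil (le_refl (1 : Int)),
        PySem.List.pyRange_one_append 0 1 ((n : Int) + 1) (by omega) (by omega)]
    simp [h01, PySem.Int.mod]
  | succ k ih =>
    have ih' := ih (by omega)
    have hc : ((k + 1 : Nat) : Int) = (k : Int) + 1 := by push_cast; ring
    rw [hc, PySem.List.pyRange_one_succ_right (by omega : (1 : Int) ≤ (k : Int) + 1),
        List.foldl_append, ih']
    set A : List Int := (PySem.List.pyRange 0 ((k : Int) + 1) 1).map (fun i => PySem.Int.mod i 2) with hAdef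
    have hA : A.length = k + 1 := by
      simp [hAdef, PySem.List.length_pyRange_one]
    rw [PySem.List.pyRange_one_cons (by omega : (k : Int) + 1 < (n : Int) + 1)]
    set B' : List Int := (PySem.List.pyRange ((k : Int) + 1 + 1) ((n : Int) + 1) 1).map (fun _ => (0 : Int)) with hB'def
    have hBmap : (((k : Int) + 1) :: PySem.List.pyRange ((k : Int) + 1 + 1) ((n : Int) + 1) 1).map (fun _ => (0 : Int)) = (0 : Int) :: B' := by
      simp [hB'def]
    rw [hBmap]
    simp only [List.foldl_cons, List.foldl_nil]
    have g1 : PySem.List.pyGetD (A ++ (0 : Int) :: B') ((k : Int) + 1 - 1) 0 = PySem.Int.mod (k : Int) 2 := by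
      rw [show (k : Int) + 1 - 1 = ((k : Nat) : Int) by ring, hAdef]
      exact getCombo _ _ _ k (by omega)
    have hm : PySem.Int.mod (k : Int) 2 = ((k % 2 : Nat) : Int) := PySem.Int.mod_natCast k 2
    have hm1 : PySem.Int.mod ((k : Int) + 1) 2 = (((k + 1) % 2 : Nat) : Int) := by
      rw [← hc]; exact PySem.Int.mod_natCast (k + 1) 2
    have hnext : (actions.foldl
        (fun s act => if act ≤ (k : Int) + 1 then PySem.Set.add s (PySem.List.pyGetD (A ++ (0 : Int) :: B') ((k : Int) + 1 - act) 0) else s)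
        PySem.Set.empty) = [PySem.Int.mod (k : Int) 2] := by
      simp only [actions, List.foldl_cons, List.foldl_nil]
      rw [if_pos (by omega : (1 : Int) ≤ (k : Int) + 1), g1]
      by_cases h3 : (3 : Int) ≤ (k : Int) + 1
      · rw [if_pos h3]
        have g3 : PySem.List.pyGetD (A ++ (0 : Int) :: B') ((k : Int) + 1 - 3) 0 = PySem.Int.mod (k : Int) 2 := by
          rw [show (k : Int) + 1 - 3 = ((k - 2 : Nat) : Int) by omega, hAdef,
              getCombo _ _ _ (k - 2) (by omega), hm,
              show PySem.Int.mod ((k - 2 : Nat) : Int) 2 = (((k - 2) % 2 : Nat) : Int) from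
                by exact_mod_cast PySem.Int.mod_natCast (k - 2) 2]
          congr 1
          omega
        rw [g3]
        simp [PySem.Set.add, PySem.Set.empty, PySem.Set.contains]
      · rw [if_neg h3]
        simp [PySem.Set.add, PySem.Set.empty, PySem.Set.contains]
    have hmex : mexLoop [PySem.Int.mod (k : Int) 2] 0 ([PySem.Int.mod (k : Int) 2].length + 1)
        = PySem.Int.mod ((k : Int) + 1) 2 := by
      rcases Nat.mod_two_eq_zero_or_one k with he | he
      · rw [hm, he, hm1, show (k + 1) % 2 = 1 by omega]
        decide
      · rw [hm, he, hm1, show (k + 1) % 2 = 0 by omega]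
        decide
    rw [aStep]
    simp only [hnext, hmex]
    rw [PySem.List.pySetD_of_nonneg _ _ (by omega : (0 : Int) ≤ (k : Int) + 1),
        show ((k : Int) + 1).toNat = k + 1 by omega,
        setAt A B' 0 _ (k + 1) (by omega),
        PySem.List.pyRange_one_succ_right (by omega : (0 : Int) ≤ (k : Int) + 1),
        List.map_append]
    simp only [List.map_cons, List.map_nil, List.append_assoc, List.singleton_append]
    rw [← hAdef]

-- ===== VERDICT (by name: the statement is the Claim_ definition above) =====
theorem count_grundy_spec : Claim_equal_count_grundy := by
  intro num _
  unfold Spec_count_grundy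
  by_cases h : 0 ≤ num
  · obtain ⟨n, rfl⟩ := Int.eq_ofNat_of_zero_le h
    rw [count_grundy_eq_foldl, inv n n le_rfl,
        show PySem.List.pyRange ((n:Int)+1) ((n:Int)+1) 1 = [] from
          PySem.List.pyRange_one_eq_nil le_rfl]
    simp [count_grundy_alt]
  · rw [count_grundy_eq_foldl, PySem.List.pyRange_one_eq_nil (by omega),
        PySem.List.pyRange_one_eq_nil (by omega)]
    simp [count_grundy_alt, PySem.List.pyRange_one_eq_nil (show (num:Int)+1 ≤ 0 by omega)]
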